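-- pv_equiv track=rewrite | github.com/DuhastMish/Computational-geometry | main.py | sorting_edges
-- ===== SOURCE A (Python) =====
-- from collections import deque
--
-- def sorting_edges(edges_list):
--     queue = deque()
--     queue.append([edges_list, 1])
--     while queue:
--         list_for_sorting, sorting_id = queue.pop()
--         number_of_elements = len(list_for_sorting)
--         middle_index = number_of_elements // 2
--         half_of_edges = [0] * middle_index
--
--         sorted_edges = [0 for a in range(number_of_elements)]
--         for i in range(number_of_elements):
--             key = list_for_sorting[i][sorting_id]
--             half_of_edges[key % middle_index] += 1
--
--         for i in range(1, middle_index):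
--             half_of_edges[i] += half_of_edges[i - 1]
--
--         for i in range(number_of_elements):
--             key = list_for_sorting[i][sorting_id]
--             sorted_edges[number_of_elements - half_of_edges[key
--                          % middle_index]] = list_for_sorting[i]
--             half_of_edges[key % middle_index] -= 1
--         if sorting_id == 0:
--             return sorted_edges
--         queue.append([sorted_edges, 0])
--
--     return sorted_edges
-- ===== SOURCE B (Python) =====
-- def sorting_edges(edges_list):
--     def bucket_pass(lst, sorting_id):
--         middle_index = len(lst) // 2
--         buckets = [[] for _ in range(middle_index)]
--         for edge in lst:
--             buckets[edge[sorting_id] % middle_index].append(edge)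
--         result = []
--         for bucket in reversed(buckets):
--             result += bucket
--         return result
--     return bucket_pass(bucket_pass(edges_list, 1), 0)
-- ===== Notes on version B (the rewrite author's own statement) =====
-- stated objective: simpler
-- what changed: Replaces the deque/while machinery and the count/prefix-sum/reverse-placement counting sort by one bucket_pass helper that drops each edge into a bucket list by its key residue and concatenates the buckets in reverse, applied twice (key 1 then key 0); no counter arrays, no prefix sums, no index arithmetic.
import Mathlib
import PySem

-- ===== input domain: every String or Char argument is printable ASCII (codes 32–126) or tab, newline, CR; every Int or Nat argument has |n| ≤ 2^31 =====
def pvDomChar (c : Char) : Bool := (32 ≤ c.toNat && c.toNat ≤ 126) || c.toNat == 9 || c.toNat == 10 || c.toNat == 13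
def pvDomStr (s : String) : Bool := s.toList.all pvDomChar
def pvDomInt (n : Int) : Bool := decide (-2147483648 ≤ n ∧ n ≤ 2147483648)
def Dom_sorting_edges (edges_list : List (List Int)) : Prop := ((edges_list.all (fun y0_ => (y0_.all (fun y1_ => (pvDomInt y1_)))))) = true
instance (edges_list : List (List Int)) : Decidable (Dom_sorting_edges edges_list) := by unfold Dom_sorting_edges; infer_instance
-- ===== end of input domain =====

-- B replaces the deque/while machinery and the count/prefix-sum/reverse-placement counting
-- sort by a bucket_pass helper (bucket by key residue, concatenate buckets in reverse),
-- applied twice; objective: simpler.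

-- ===== PORT A =====
-- one iteration of A's while-loop body (the counting sort on list_for_sorting by key sorting_id)
def sortBodyA (list_for_sorting : List (List Int)) (sorting_id : Int) : List (List Int) :=
  let number_of_elements := list_for_sorting.length
  let middle_index := number_of_elements / 2      -- len // 2, nonneg so Nat division is exact
  let half_of_edges : List Int := List.replicate middle_index 0
  -- Python initialises sorted_edges with int 0s; every cell is overwritten before it is
  -- returned, so the placeholder is [] here
  let sorted_edges : List (List Int) := (List.range number_of_elements).map (fun _ => [])
  let half_of_edges := (PySem.List.pyRange 0 (number_of_elements : Int) 1).foldl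
    (fun h i =>
      let key := PySem.List.pyGetD (PySem.List.pyGetD list_for_sorting i []) sorting_id 0
      PySem.List.pySetD h (PySem.Int.mod key (middle_index : Int))
        (PySem.List.pyGetD h (PySem.Int.mod key (middle_index : Int)) 0 + 1)) half_of_edges
  let half_of_edges := (PySem.List.pyRange 1 (middle_index : Int) 1).foldl
    (fun h i => PySem.List.pySetD h i
      (PySem.List.pyGetD h i 0 + PySem.List.pyGetD h (i - 1) 0)) half_of_edges
  let st := (PySem.List.pyRange 0 (number_of_elements : Int) 1).foldl
    (fun (st : List (List Int) × List Int) i =>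
      let key := PySem.List.pyGetD (PySem.List.pyGetD list_for_sorting i []) sorting_id 0
      let r := PySem.Int.mod key (middle_index : Int)
      (PySem.List.pySetD st.1 ((number_of_elements : Int) - PySem.List.pyGetD st.2 r 0)
         (PySem.List.pyGetD list_for_sorting i []),
       PySem.List.pySetD st.2 r (PySem.List.pyGetD st.2 r 0 - 1)))
    (sorted_edges, half_of_edges)
  st.1

-- the while loop over the deque (used as a stack: pop/append on the right = head here);
-- it runs at most twice (the pushed item has sorting_id 0, which returns), the fuel is a
-- totality guard that is never exhausted
def loopA : Nat → List (List (List Int) × Int) → List (List Int)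
  | _, [] => []
  | 0, _ => []
  | fuel + 1, (list_for_sorting, sorting_id) :: rest =>
    let sorted_edges := sortBodyA list_for_sorting sorting_id
    if sorting_id == 0 then sorted_edges
    else loopA fuel ((sorted_edges, 0) :: rest)

def sorting_edges (edges_list : List (List Int)) : List (List Int) :=
  loopA 2 [(edges_list, 1)]

-- ===== PORT B =====
def bucketPass (lst : List (List Int)) (sorting_id : Int) : List (List Int) :=
  let middle_index := lst.length / 2
  let buckets : List (List (List Int)) := (List.range middle_index).map (fun _ => [])
  let buckets := lst.foldl
    (fun bs edge =>
      let r := PySem.Int.mod (PySem.List.pyGetD edge sorting_id 0) (middle_index : Int)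
      PySem.List.pySetD bs r (PySem.List.pyGetD bs r [] ++ [edge])) buckets
  buckets.reverse.foldl (fun result bucket => result ++ bucket) []

def sorting_edges_alt (edges_list : List (List Int)) : List (List Int) :=
  bucketPass (bucketPass edges_list 1) 0

-- ===== PRECONDITION & SPEC =====
-- Pre_ excludes exactly the inputs on which Python A raises: a single-element list
-- (ZeroDivisionError from key % (1 // 2)) and lists containing an edge of fewer than two
-- coordinates (IndexError on edge[1] or edge[0]).
def Pre_sorting_edges (edges_list : List (List Int)) : Prop :=
  edges_list.length ≠ 1 ∧ ∀ e ∈ edges_list, 2 ≤ e.length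
instance (edges_list : List (List Int)) : Decidable (Pre_sorting_edges edges_list) := by
  unfold Pre_sorting_edges; infer_instance

def pvWitness_sorting_edges : List (List Int) := [[3, 1], [2, 0], [5, 1], [0, 0]]

def Spec_sorting_edges (edges_list : List (List Int)) (out : List (List Int)) : Prop :=
  out = sorting_edges_alt edges_list
instance (edges_list : List (List Int)) (out : List (List Int)) :
    Decidable (Spec_sorting_edges edges_list out) := by unfold Spec_sorting_edges; infer_instance

-- ===== CLAIM (what is proved, stated in full; the proofs are below) =====
def Claim_equal_sorting_edges : Prop := ∀ (edges_list : List (List Int)),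
  Dom_sorting_edges edges_list → Pre_sorting_edges edges_list →
  Spec_sorting_edges edges_list (sorting_edges edges_list)

-- ===== LEMMAS AND PROOFS =====

-- residue of an edge's key, the quantity both passes bucket by
def resOf (m : Nat) (sid : Int) (e : List Int) : Nat :=
  (PySem.Int.mod (PySem.List.pyGetD e sid 0) (m : Int)).toNat

-- Boolean predicate "edge e falls into bucket j"
def isRes (m : Nat) (sid : Int) (j : Nat) (e : List Int) : Bool := resOf m sid e == j

-- how many edges of p fall in bucket j
def cnt (m : Nat) (sid : Int) (p : List (List Int)) (j : Nat) : Nat :=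
  p.countP (isRes m sid j)

-- Σ_{j' < j} cnt j'
def psum (m : Nat) (sid : Int) (p : List (List Int)) : Nat → Nat
  | 0 => 0
  | j + 1 => psum m sid p j + cnt m sid p j

-- bucket j after the edges of p have been placed, padded to its final size
def piece (m : Nat) (sid : Int) (full p : List (List Int)) (j : Nat) : List (List Int) :=
  p.filter (isRes m sid j) ++
    List.replicate (cnt m sid full j - cnt m sid p j) ([] : List Int)

-- buckets j-1, …, 0 laid out back to front
def build (m : Nat) (sid : Int) (full p : List (List Int)) : Nat → List (List Int)
  | 0 => []
  | j + 1 => piece m sid full p j ++ build m sid full p j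

theorem res_lt (m : Nat) (hm : 1 ≤ m) (sid : Int) (e : List Int) : resOf m sid e < m := by
  unfold resOf
  rw [PySem.Int.mod_eq_emod_of_pos (by exact_mod_cast hm)]
  have h := Int.emod_lt_of_pos (PySem.List.pyGetD e sid 0) (b := (m : Int)) (by exact_mod_cast hm)
  omega

theorem res_cast (m : Nat) (hm : 1 ≤ m) (sid : Int) (e : List Int) :
    (resOf m sid e : Int) = PySem.Int.mod (PySem.List.pyGetD e sid 0) (m : Int) := by
  unfold resOf
  rw [PySem.Int.mod_eq_emod_of_pos (by exact_mod_cast hm)]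
  have h := Int.emod_nonneg (PySem.List.pyGetD e sid 0) (b := (m : Int)) (by exact_mod_cast Nat.one_le_iff_ne_zero.mp hm)
  omega

theorem getD_map_range {α : Type} (f : Nat → α) (m j : Nat) (hj : j < m) (d : α) :
    PySem.List.pyGetD ((List.range m).map f) (j : Int) d = f j := by
  rw [PySem.List.pyGetD_eq_getElem _ d (by omega) (by simp; exact_mod_cast hj)]
  simp

theorem setD_map_range {α : Type} (f : Nat → α) (m j : Nat) (_hj : j < m) (v : α) :
    PySem.List.pySetD ((List.range m).map f) (j : Int) v
      = (List.range m).map (fun j' => if j' = j then v else f j') := by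
  rw [PySem.List.pySetD_of_nonneg _ _ (by omega)]
  simp only [Int.toNat_natCast]
  apply List.ext_getElem (by simp)
  intro i h1 h2
  rcases eq_or_ne j i with he | hne
  · subst he
    simp
  · simp [hne, Ne.symm hne]

theorem map_range_congr {α : Type} (m : Nat) (f g : Nat → α) (h : ∀ j < m, f j = g j) :
    (List.range m).map f = (List.range m).map g :=
  List.map_congr_left (fun j hj => h j (List.mem_range.mp hj))

theorem cnt_append (m : Nat) (sid : Int) (p q : List (List Int)) (j : Nat) :
    cnt m sid (p ++ q) j = cnt m sid p j + cnt m sid q j := by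
  simp [cnt, List.countP_append]

theorem cnt_singleton (m : Nat) (sid : Int) (e : List Int) (j : Nat) :
    cnt m sid [e] j = if resOf m sid e = j then 1 else 0 := by
  simp only [cnt, List.countP_cons, List.countP_nil, Nat.zero_add]
  simp [isRes]

theorem psum_nil (m : Nat) (sid : Int) : ∀ j, psum m sid [] j = 0 := by
  intro j; induction j with
  | zero => rfl
  | succ j ih => simp [psum, ih, cnt]

theorem psum_mono (m : Nat) (sid : Int) (p : List (List Int)) {a b : Nat} (h : a ≤ b) :
    psum m sid p a ≤ psum m sid p b := by
  induction b with
  | zero =>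
    have : a = 0 := by omega
    subst this
    exact le_refl _
  | succ b ih =>
    rcases Nat.eq_or_lt_of_le h with he | hlt
    · subst he
      exact le_refl _
    · have := ih (by omega)
      simp only [psum]
      omega

theorem psum_append_singleton (m : Nat) (sid : Int) (p : List (List Int)) (e : List Int) :
    ∀ j, psum m sid (p ++ [e]) j = psum m sid p j + (if resOf m sid e < j then 1 else 0) := by
  intro j; induction j with
  | zero => simp [psum]
  | succ j ih =>
    simp only [psum, ih, cnt_append, cnt_singleton]
    split_ifs <;> omega

theorem psum_len (m : Nat) (hm : 1 ≤ m) (sid : Int) (p : List (List Int)) :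
    psum m sid p m = p.length := by
  induction p using List.reverseRecOn with
  | nil => exact psum_nil m sid m
  | append_singleton p e ih =>
    rw [psum_append_singleton]
    simp [ih, if_pos (res_lt m hm sid e)]

theorem length_piece (m : Nat) (sid : Int) (full p : List (List Int)) (j : Nat)
    (hle : cnt m sid p j ≤ cnt m sid full j) :
    (piece m sid full p j).length = cnt m sid full j := by
  simp only [piece, List.length_append, List.length_replicate]
  rw [← List.countP_eq_length_filter]
  simp only [cnt] at *
  omega

theorem length_build (m : Nat) (sid : Int) (full p : List (List Int))
    (hle : ∀ j', cnt m sid p j' ≤ cnt m sid full j') :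
    ∀ j, (build m sid full p j).length = psum m sid full j := by
  intro j; induction j with
  | zero => rfl
  | succ j ih =>
    simp only [build, psum, List.length_append, ih, length_piece m sid full p j (hle j)]
    omega

theorem build_nil (m : Nat) (sid : Int) (full : List (List Int)) :
    ∀ j, build m sid full [] j = List.replicate (psum m sid full j) ([] : List Int) := by
  intro j; induction j with
  | zero => rfl
  | succ j ih =>
    simp only [build, psum, ih, piece, List.filter_nil, List.nil_append]
    rw [Nat.add_comm, List.replicate_add]
    simp [cnt]

theorem piece_append_ne (m : Nat) (sid : Int) (full p : List (List Int)) (e : List Int) (j : Nat)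
    (hne : resOf m sid e ≠ j) :
    piece m sid full (p ++ [e]) j = piece m sid full p j := by
  simp only [piece, List.filter_append, cnt_append, cnt_singleton, if_neg hne]
  have : (fun x => isRes m sid j x) e = false := by simp [isRes, hne]
  simp [this]

theorem build_append_of_le (m : Nat) (sid : Int) (full p : List (List Int)) (e : List Int) :
    ∀ j, j ≤ resOf m sid e → build m sid full (p ++ [e]) j = build m sid full p j := by
  intro j; induction j with
  | zero => intro _; rfl
  | succ j ih =>
    intro hj
    simp only [build, ih (by omega), piece_append_ne m sid full p e j (by omega)]

theorem build_set (m : Nat) (sid : Int) (full p rest : List (List Int)) (e : List Int)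
    (hf : full = p ++ e :: rest) :
    ∀ j, resOf m sid e < j →
      (build m sid full p j).set
          (psum m sid full j - psum m sid full (resOf m sid e + 1) + cnt m sid p (resOf m sid e)) e
        = build m sid full (p ++ [e]) j := by
  have hle : ∀ j', cnt m sid p j' ≤ cnt m sid full j' := by
    intro j'; rw [hf, cnt_append]; omega
  have hcnt : cnt m sid p (resOf m sid e) < cnt m sid full (resOf m sid e) := by
    rw [hf, cnt_append]
    have : 1 ≤ cnt m sid (e :: rest) (resOf m sid e) := by
      simp only [cnt, List.countP_cons]
      have : (fun x => isRes m sid (resOf m sid e) x) e = true := by simp [isRes]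
      simp [this]
    omega
  intro j; induction j with
  | zero => omega
  | succ j ih =>
    intro hj
    rcases Nat.lt_or_ge (resOf m sid e) j with hlt | hge
    · -- the set index lands in the tail `build … j`
      simp only [build]
      have hplen : (piece m sid full p j).length = cnt m sid full j :=
        length_piece m sid full p j (hle j)
      have hmono : psum m sid full (resOf m sid e + 1) ≤ psum m sid full j :=
        psum_mono m sid full hlt
      have hpj : psum m sid full (j + 1) = psum m sid full j + cnt m sid full j := rfl
      rw [List.set_append, if_neg (by rw [hplen]; omega)]
      rw [piece_append_ne m sid full p e j (by omega)]
      congr 1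
      rw [← ih hlt]
      congr 1
      rw [hplen]
      omega
    · -- j = resOf e : the set hits the first padding slot of this piece
      have hje : resOf m sid e = j := by omega
      subst hje
      simp only [build]
      have hsub : psum m sid full (resOf m sid e + 1) - psum m sid full (resOf m sid e + 1)
          + cnt m sid p (resOf m sid e) = cnt m sid p (resOf m sid e) := by omega
      have hplen : (piece m sid full p (resOf m sid e)).length = cnt m sid full (resOf m sid e) :=
        length_piece m sid full p (resOf m sid e) (hle _)
      rw [hsub, List.set_append, if_pos (by omega)]
      rw [build_append_of_le m sid full p e (resOf m sid e) (le_refl _)]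
      congr 1
      -- set inside the piece: it replaces the first padding slot
      have hfl : (p.filter (isRes m sid (resOf m sid e))).length = cnt m sid p (resOf m sid e) := by
        unfold cnt
        exact List.countP_eq_length_filter.symm
      have h1 : List.filter (isRes m sid (resOf m sid e)) [e] = [e] := by simp [isRes]
      have h2 : cnt m sid (p ++ [e]) (resOf m sid e) = cnt m sid p (resOf m sid e) + 1 := by
        rw [cnt_append, cnt_singleton, if_pos rfl]
      have hR : piece m sid full (p ++ [e]) (resOf m sid e)
          = p.filter (isRes m sid (resOf m sid e)) ++
              (e :: List.replicate (cnt m sid full (resOf m sid e) - (cnt m sid p (resOf m sid e) + 1)) []) := by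
        show (p ++ [e]).filter (isRes m sid (resOf m sid e)) ++ _ = _
        rw [List.filter_append, h1, h2, List.append_assoc]
        rfl
      have hL : (List.replicate (cnt m sid full (resOf m sid e) - cnt m sid p (resOf m sid e)) ([] : List Int)).set 0 e
          = e :: List.replicate (cnt m sid full (resOf m sid e) - (cnt m sid p (resOf m sid e) + 1)) [] := by
        have hk : cnt m sid full (resOf m sid e) - cnt m sid p (resOf m sid e)
            = (cnt m sid full (resOf m sid e) - (cnt m sid p (resOf m sid e) + 1)) + 1 := by omega
        rw [hk, List.replicate_succ, List.set_cons_zero]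
      rw [hR]
      show (p.filter (isRes m sid (resOf m sid e)) ++
        List.replicate (cnt m sid full (resOf m sid e) - cnt m sid p (resOf m sid e)) []).set
          (cnt m sid p (resOf m sid e)) e = _
      rw [List.set_append, if_neg (by rw [hfl]; omega), hfl, Nat.sub_self, hL]

-- ===== the three loops of A's counting sort, characterised =====

theorem countLoopA (m : Nat) (sid : Int) (hm : 1 ≤ m) :
    ∀ (rest p : List (List Int)),
      rest.foldl (fun h e =>
          PySem.List.pySetD h (PySem.Int.mod (PySem.List.pyGetD e sid 0) (m : Int))
            (PySem.List.pyGetD h (PySem.Int.mod (PySem.List.pyGetD e sid 0) (m : Int)) 0 + 1))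
        ((List.range m).map (fun j => (cnt m sid p j : Int)))
      = (List.range m).map (fun j => (cnt m sid (p ++ rest) j : Int)) := by
  intro rest
  induction rest with
  | nil => intro p; simp
  | cons e rest ih =>
    intro p
    have hje := res_lt m hm sid e
    rw [List.foldl_cons, ← res_cast m hm sid e, getD_map_range _ m _ hje,
      setD_map_range _ m _ hje]
    have : (List.range m).map (fun j' => if j' = resOf m sid e then (cnt m sid p (resOf m sid e) : Int) + 1 else (cnt m sid p j' : Int))
        = (List.range m).map (fun j => (cnt m sid (p ++ [e]) j : Int)) := by
      apply map_range_congr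
      intro j hj
      rw [cnt_append, cnt_singleton]
      rcases eq_or_ne j (resOf m sid e) with h | h
      · subst h
        rw [if_pos rfl, if_pos rfl]
        push_cast
        ring
      · rw [if_neg h, if_neg (by omega)]
        push_cast
        ring
    rw [this, ih (p ++ [e]), List.append_assoc]
    rfl

theorem prefixLoopA (m : Nat) (sid : Int) (_hm : 1 ≤ m) (full : List (List Int)) :
    ∀ t, 1 ≤ t → t ≤ m →
      (PySem.List.pyRange 1 (t : Int) 1).foldl
          (fun h i => PySem.List.pySetD h i
            (PySem.List.pyGetD h i 0 + PySem.List.pyGetD h (i - 1) 0))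
          ((List.range m).map (fun j => (cnt m sid full j : Int)))
        = (List.range m).map (fun j =>
            if j + 1 ≤ t then (psum m sid full (j + 1) : Int) else (cnt m sid full j : Int)) := by
  intro t
  induction t with
  | zero => omega
  | succ t ih =>
    intro _ htm
    rcases Nat.eq_or_lt_of_le (Nat.one_le_iff_ne_zero.mpr (by omega) : 1 ≤ t + 1) with h1 | h1
    · -- t + 1 = 1 : empty range
      have ht0 : t = 0 := by omega
      subst ht0
      rw [PySem.List.pyRange_one_eq_nil (by norm_num)]
      simp only [List.foldl_nil]
      apply map_range_congr
      intro j hj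
      split_ifs with h
      · have : j = 0 := by omega
        subst this
        simp [psum]
      · rfl
    · -- t ≥ 1
      have ht1 : 1 ≤ t := by omega
      have hcast : ((t + 1 : Nat) : Int) = (t : Int) + 1 := by push_cast; ring
      rw [hcast, PySem.List.pyRange_one_succ_right (by exact_mod_cast ht1), List.foldl_append,
        ih ht1 (by omega), List.foldl_cons, List.foldl_nil]
      have htm' : t < m := by omega
      have hread1 : PySem.List.pyGetD ((List.range m).map (fun j =>
          if j + 1 ≤ t then (psum m sid full (j + 1) : Int) else (cnt m sid full j : Int))) (t : Int) 0
          = (cnt m sid full t : Int) := by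
        rw [getD_map_range _ m t htm']
        simp
      have hcast2 : (t : Int) - 1 = ((t - 1 : Nat) : Int) := by omega
      have hread2 : PySem.List.pyGetD ((List.range m).map (fun j =>
          if j + 1 ≤ t then (psum m sid full (j + 1) : Int) else (cnt m sid full j : Int))) ((t : Int) - 1) 0
          = (psum m sid full t : Int) := by
        rw [hcast2, getD_map_range _ m (t - 1) (by omega)]
        rw [if_pos (by omega)]
        have ht : t - 1 + 1 = t := by omega
        rw [ht]
      rw [hread1, hread2, setD_map_range _ m t htm']
      apply map_range_congr
      intro j hj
      rcases eq_or_ne j t with hjt | hjt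
      · subst hjt
        rw [if_pos rfl, if_pos (by omega)]
        simp only [psum]
        push_cast
        ring
      · rw [if_neg hjt]
        by_cases hc : j + 1 ≤ t
        · rw [if_pos hc, if_pos (by omega)]
        · rw [if_neg hc, if_neg (by omega)]

theorem placeLoopA (m : Nat) (sid : Int) (hm : 1 ≤ m) :
    ∀ (rest p full : List (List Int)), full = p ++ rest →
      rest.foldl (fun (st : List (List Int) × List Int) e =>
          (PySem.List.pySetD st.1
              ((full.length : Int) - PySem.List.pyGetD st.2
                (PySem.Int.mod (PySem.List.pyGetD e sid 0) (m : Int)) 0) e,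
           PySem.List.pySetD st.2 (PySem.Int.mod (PySem.List.pyGetD e sid 0) (m : Int))
             (PySem.List.pyGetD st.2 (PySem.Int.mod (PySem.List.pyGetD e sid 0) (m : Int)) 0 - 1)))
        (build m sid full p m,
         (List.range m).map (fun j => (psum m sid full (j + 1) : Int) - (cnt m sid p j : Int)))
      = (build m sid full full m,
         (List.range m).map (fun j => (psum m sid full (j + 1) : Int) - (cnt m sid full j : Int))) := by
  intro rest
  induction rest with
  | nil =>
    intro p full hf
    simp [hf]
  | cons e rest ih =>
    intro p full hf
    have hje := res_lt m hm sid e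
    rw [List.foldl_cons, ← res_cast m hm sid e, getD_map_range _ m _ hje,
      setD_map_range _ m _ hje]
    have hpsle : psum m sid full (resOf m sid e + 1) ≤ full.length := by
      rw [← psum_len m hm sid full]
      exact psum_mono m sid full (by omega)
    have hcle : cnt m sid p (resOf m sid e) + cnt m sid (e :: rest) (resOf m sid e)
        = cnt m sid full (resOf m sid e) := by rw [hf, cnt_append]
    -- the placement index
    have hidx : (full.length : Int) - ((psum m sid full (resOf m sid e + 1) : Int) - (cnt m sid p (resOf m sid e) : Int))
        = ((full.length - psum m sid full (resOf m sid e + 1) + cnt m sid p (resOf m sid e) : Nat) : Int) := by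
      push_cast [hpsle]
      omega
    rw [hidx, PySem.List.pySetD_of_nonneg _ _ (by omega), Int.toNat_natCast]
    have hset : (build m sid full p m).set
        (full.length - psum m sid full (resOf m sid e + 1) + cnt m sid p (resOf m sid e)) e
        = build m sid full (p ++ [e]) m := by
      rw [← psum_len m hm sid full]
      exact build_set m sid full p rest e hf m hje
    rw [hset]
    have hh : (List.range m).map (fun j' =>
        if j' = resOf m sid e then (psum m sid full (resOf m sid e + 1) : Int) - (cnt m sid p (resOf m sid e) : Int) - 1
        else (psum m sid full (j' + 1) : Int) - (cnt m sid p j' : Int))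
        = (List.range m).map (fun j => (psum m sid full (j + 1) : Int) - (cnt m sid (p ++ [e]) j : Int)) := by
      apply map_range_congr
      intro j hj
      rw [cnt_append, cnt_singleton]
      rcases eq_or_ne j (resOf m sid e) with h | h
      · subst h
        rw [if_pos rfl, if_pos rfl]
        push_cast
        ring
      · rw [if_neg h, if_neg (by omega)]
        push_cast
        ring
    rw [hh, ih (p ++ [e]) full (by rw [hf, List.append_assoc]; rfl)]

-- ===== B's bucket loop, characterised =====

theorem bucketLoopB (m : Nat) (sid : Int) (hm : 1 ≤ m) :
    ∀ (rest p : List (List Int)),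
      rest.foldl (fun bs e =>
          PySem.List.pySetD bs (PySem.Int.mod (PySem.List.pyGetD e sid 0) (m : Int))
            (PySem.List.pyGetD bs (PySem.Int.mod (PySem.List.pyGetD e sid 0) (m : Int)) [] ++ [e]))
        ((List.range m).map (fun j => p.filter (fun x => isRes m sid j x)))
      = (List.range m).map (fun j => (p ++ rest).filter (fun x => isRes m sid j x)) := by
  intro rest
  induction rest with
  | nil => intro p; simp
  | cons e rest ih =>
    intro p
    have hje := res_lt m hm sid e
    rw [List.foldl_cons, ← res_cast m hm sid e, getD_map_range _ m _ hje,
      setD_map_range _ m _ hje]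
    have : (List.range m).map (fun j' =>
        if j' = resOf m sid e then p.filter (fun x => isRes m sid (resOf m sid e) x) ++ [e]
        else p.filter (fun x => isRes m sid j' x))
        = (List.range m).map (fun j => (p ++ [e]).filter (fun x => isRes m sid j x)) := by
      apply map_range_congr
      intro j hj
      rw [List.filter_append]
      rcases eq_or_ne j (resOf m sid e) with hjt | hjt
      · subst hjt
        rw [if_pos rfl]
        congr 1
        simp [isRes]
      · rw [if_neg hjt]
        have : (fun x => isRes m sid j x) e = false := by simp [isRes]; omega
        simp [this]
    rw [this, ih (p ++ [e]), List.append_assoc]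
    rfl

theorem revFoldB (m : Nat) (sid : Int) (full : List (List Int)) :
    ∀ (j : Nat) (acc : List (List Int)),
      (((List.range j).map (fun j' => full.filter (fun x => isRes m sid j' x))).reverse).foldl
          (fun r b => r ++ b) acc
        = acc ++ build m sid full full j := by
  intro j
  induction j with
  | zero => intro acc; simp [build]
  | succ j ih =>
    intro acc
    rw [List.range_succ, List.map_append, List.reverse_append]
    simp only [List.map_cons, List.map_nil, List.reverse_cons, List.reverse_nil,
      List.nil_append, List.cons_append, List.foldl_cons]
    rw [ih (acc ++ full.filter (fun x => isRes m sid j x))]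
    simp only [build, piece]
    have : cnt m sid full j - cnt m sid full j = 0 := by omega
    rw [this]
    simp [List.append_assoc]

-- ===== each pass equals `build`; the passes coincide =====

theorem foldl_idx {β : Type} (lst : List (List Int)) (g : β → List Int → β) (init : β) :
    (PySem.List.pyRange 0 (lst.length : Int) 1).foldl
        (fun acc i => g acc (PySem.List.pyGetD lst i [])) init
      = lst.foldl g init :=
  PySem.List.foldl_pyRange_zero_pyGetD' lst [] g init

theorem bucketPass_eq_build (lst : List (List Int)) (sid : Int) (hm : 1 ≤ lst.length / 2) :
    bucketPass lst sid = build (lst.length / 2) sid lst lst (lst.length / 2) := by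
  simp only [bucketPass]
  have hinit : ((List.range (lst.length / 2)).map (fun _ => ([] : List (List Int))))
      = (List.range (lst.length / 2)).map (fun j => ([] : List (List Int)).filter (fun x => isRes (lst.length / 2) sid j x)) := rfl
  rw [hinit, bucketLoopB (lst.length / 2) sid hm lst [], List.nil_append,
    revFoldB (lst.length / 2) sid lst (lst.length / 2) [], List.nil_append]

theorem sortBody_eq_build (lst : List (List Int)) (sid : Int) (hm : 1 ≤ lst.length / 2) :
    sortBodyA lst sid = build (lst.length / 2) sid lst lst (lst.length / 2) := by
  simp only [sortBodyA]
  rw [foldl_idx lst (fun h e =>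
      PySem.List.pySetD h (PySem.Int.mod (PySem.List.pyGetD e sid 0) ((lst.length / 2 : Nat) : Int))
        (PySem.List.pyGetD h (PySem.Int.mod (PySem.List.pyGetD e sid 0) ((lst.length / 2 : Nat) : Int)) 0 + 1))]
  rw [foldl_idx lst (fun (st : List (List Int) × List Int) e =>
      (PySem.List.pySetD st.1
          ((lst.length : Int) - PySem.List.pyGetD st.2
            (PySem.Int.mod (PySem.List.pyGetD e sid 0) ((lst.length / 2 : Nat) : Int)) 0) e,
       PySem.List.pySetD st.2 (PySem.Int.mod (PySem.List.pyGetD e sid 0) ((lst.length / 2 : Nat) : Int))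
         (PySem.List.pyGetD st.2 (PySem.Int.mod (PySem.List.pyGetD e sid 0) ((lst.length / 2 : Nat) : Int)) 0 - 1)))]
  have hinit : (List.range (lst.length / 2)).map (fun j => (cnt (lst.length / 2) sid [] j : Int))
      = List.replicate (lst.length / 2) (0 : Int) := by
    rw [map_range_congr _ _ (fun _ => (0 : Int)) (fun j _ => by simp [cnt]),
      List.map_const', List.length_range]
  rw [← hinit, countLoopA (lst.length / 2) sid hm lst [], List.nil_append]
  rw [prefixLoopA (lst.length / 2) sid hm lst (lst.length / 2) hm (le_refl _)]
  have hpre : (List.range (lst.length / 2)).map (fun j =>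
      if j + 1 ≤ lst.length / 2 then (psum (lst.length / 2) sid lst (j + 1) : Int)
      else (cnt (lst.length / 2) sid lst j : Int))
      = (List.range (lst.length / 2)).map (fun j =>
        (psum (lst.length / 2) sid lst (j + 1) : Int) - (cnt (lst.length / 2) sid [] j : Int)) := by
    apply map_range_congr
    intro j hj
    rw [if_pos (by omega)]
    simp [cnt]
  rw [hpre]
  have hsort : (List.range lst.length).map (fun _ => ([] : List Int))
      = build (lst.length / 2) sid lst [] (lst.length / 2) := by
    rw [build_nil, psum_len (lst.length / 2) hm sid lst, List.map_const', List.length_range]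
  rw [hsort, placeLoopA (lst.length / 2) sid hm lst [] lst rfl]

theorem sortBody_eq_bucketPass (lst : List (List Int)) (sid : Int) (h : lst.length ≠ 1) :
    sortBodyA lst sid = bucketPass lst sid := by
  rcases Nat.eq_zero_or_pos lst.length with h0 | h0
  · have : lst = [] := List.length_eq_zero_iff.mp h0
    subst this
    rfl
  · have hm : 1 ≤ lst.length / 2 := by omega
    rw [sortBody_eq_build lst sid hm, bucketPass_eq_build lst sid hm]

theorem length_bucketPass (lst : List (List Int)) (sid : Int) (h : lst.length ≠ 1) :
    (bucketPass lst sid).length = lst.length := by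
  rcases Nat.eq_zero_or_pos lst.length with h0 | h0
  · have : lst = [] := List.length_eq_zero_iff.mp h0
    subst this
    rfl
  · have hm : 1 ≤ lst.length / 2 := by omega
    rw [bucketPass_eq_build lst sid hm,
      length_build _ sid lst lst (fun _ => le_refl _) (lst.length / 2),
      psum_len _ hm sid lst]

-- ===== VERDICT (by name: the statement is the Claim_ definition above) =====
theorem sorting_edges_spec : Claim_equal_sorting_edges := by
  intro edges_list _ hpre
  unfold Spec_sorting_edges
  have h1 : edges_list.length ≠ 1 := hpre.1
  have h2 : (bucketPass edges_list 1).length ≠ 1 := by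
    rw [length_bucketPass edges_list 1 h1]; exact h1
  show sorting_edges edges_list = sorting_edges_alt edges_list
  unfold sorting_edges sorting_edges_alt loopA
  simp only []
  rw [if_neg (by decide)]
  unfold loopA
  rw [if_pos (by decide)]
  rw [sortBody_eq_bucketPass edges_list 1 h1, sortBody_eq_bucketPass _ 0 h2]
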